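-- pv_equiv track=rewrite | github.com/Taylor-Stacey/CodeSignalQuestions | out/arcade/code-arcade/loop-tunnel/Magical Well/solution.py | magicalWell
-- ===== SOURCE A (Python) =====
-- def magicalWell(a, b, n):
--     count = 0
--     money = 0
--
--     while count < n:
--         money += a*b
--         count += 1
--         a += 1
--         b += 1
--
--     return money
-- ===== SOURCE B (Python) =====
-- def magicalWell(a, b, n):
--     m = max(n, 0)
--     return m * a * b + (a + b) * (m * (m - 1) // 2) + (m - 1) * m * (2 * m - 1) // 6
-- ===== Notes on version B (the rewrite author's own statement) =====
-- stated objective: faster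
-- what changed: Replaces the O(n) while-loop accumulation with the closed-form sum m*a*b + (a+b)*m(m-1)/2 + (m-1)m(2m-1)/6 with m = max(n,0).
import Mathlib
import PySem

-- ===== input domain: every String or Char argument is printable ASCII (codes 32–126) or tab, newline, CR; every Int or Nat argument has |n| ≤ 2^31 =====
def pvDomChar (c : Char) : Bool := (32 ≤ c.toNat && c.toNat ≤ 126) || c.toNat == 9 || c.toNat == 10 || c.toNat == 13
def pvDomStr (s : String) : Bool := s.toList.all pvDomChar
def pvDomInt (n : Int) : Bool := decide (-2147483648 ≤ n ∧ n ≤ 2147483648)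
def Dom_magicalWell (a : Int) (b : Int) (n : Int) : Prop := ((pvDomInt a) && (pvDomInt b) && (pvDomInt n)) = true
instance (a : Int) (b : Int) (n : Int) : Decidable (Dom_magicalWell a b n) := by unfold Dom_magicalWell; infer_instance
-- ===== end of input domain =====

-- B replaces A's O(n) accumulation loop with the O(1) closed-form sum (measured faster).

-- ===== PORT A =====
-- the while loop: state (a, b, count, money), runs while count < n
def magicalWellLoop (a b money count n : Int) : Int :=
  if h : count < n then
    magicalWellLoop (a + 1) (b + 1) (money + a * b) (count + 1) n
  else
    money
termination_by (n - count).toNat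
decreasing_by omega

def magicalWell (a : Int) (b : Int) (n : Int) : Int :=
  magicalWellLoop a b 0 0 n

-- ===== PORT B =====
def magicalWell_alt (a : Int) (b : Int) (n : Int) : Int :=
  let m := max n 0
  m * a * b + (a + b) * (PySem.Int.floordiv (m * (m - 1)) 2)
    + PySem.Int.floordiv ((m - 1) * m * (2 * m - 1)) 6

-- ===== PRECONDITION & SPEC =====
def Spec_magicalWell (a : Int) (b : Int) (n : Int) (out : Int) : Prop := out = magicalWell_alt a b n
instance (a : Int) (b : Int) (n : Int) (out : Int) : Decidable (Spec_magicalWell a b n out) := by unfold Spec_magicalWell; infer_instance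

-- ===== CLAIM (what is proved, stated in full; the proofs are below) =====
def Claim_equal_magicalWell : Prop := ∀ (a : Int) (b : Int) (n : Int), Dom_magicalWell a b n → Spec_magicalWell a b n (magicalWell a b n)

-- ===== LEMMAS AND PROOFS =====

-- the exact sum the loop accumulates, as a structural recursion on the iteration count
def sval (a b : Int) : Nat → Int
  | 0 => 0
  | Nat.succ m => a * b + sval (a + 1) (b + 1) m

theorem magicalWellLoop_eq (m : Nat) : ∀ (a b money count n : Int),
    (n - count).toNat = m → magicalWellLoop a b money count n = money + sval a b m := by
  induction m with
  | zero =>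
    intro a b money count n h
    rw [magicalWellLoop]
    have : ¬ count < n := by omega
    simp [this, sval]
  | succ m ih =>
    intro a b money count n h
    rw [magicalWellLoop]
    have hlt : count < n := by omega
    simp only [hlt, dif_pos]
    rw [ih (a + 1) (b + 1) (money + a * b) (count + 1) n (by omega)]
    simp [sval]; ring

theorem six_mul_sval (m : Nat) : ∀ (a b : Int),
    6 * sval a b m = 6 * m * a * b + 3 * (a + b) * (m * (m - 1)) + (m - 1) * m * (2 * m - 1) := by
  induction m with
  | zero => intro a b; simp [sval]
  | succ m ih =>
    intro a b
    rw [sval, mul_add, ih (a + 1) (b + 1)]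
    push_cast
    ring

theorem two_dvd_tri (m : Int) : 2 ∣ m * (m - 1) := by
  rcases Int.even_or_odd m with ⟨k, hk⟩ | ⟨k, hk⟩
  · exact ⟨k * (m - 1), by rw [hk]; ring⟩
  · exact ⟨m * k, by rw [hk]; ring⟩

theorem six_dvd_sq (m : Int) : 6 ∣ (m - 1) * m * (2 * m - 1) := by
  have h2 : (2 : Int) ∣ (m - 1) * m * (2 * m - 1) := by
    rcases Int.even_or_odd m with ⟨k, hk⟩ | ⟨k, hk⟩
    · exact ⟨(m - 1) * k * (2 * m - 1), by rw [hk]; ring⟩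
    · exact ⟨k * m * (2 * m - 1), by rw [hk]; ring⟩
  have h3 : (3 : Int) ∣ (m - 1) * m * (2 * m - 1) := by
    have hr : m % 3 = 0 ∨ m % 3 = 1 ∨ m % 3 = 2 := by omega
    rcases hr with hr | hr | hr
    · obtain ⟨k, hk⟩ : ∃ k, m = 3 * k := ⟨m / 3, by omega⟩
      exact ⟨(3 * k - 1) * k * (2 * (3 * k) - 1), by rw [hk]; ring⟩
    · obtain ⟨k, hk⟩ : ∃ k, m = 3 * k + 1 := ⟨m / 3, by omega⟩
      exact ⟨k * (3 * k + 1) * (2 * (3 * k + 1) - 1), by rw [hk]; ring⟩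
    · obtain ⟨k, hk⟩ : ∃ k, m = 3 * k + 2 := ⟨m / 3, by omega⟩
      exact ⟨(3 * k + 1) * (3 * k + 2) * (2 * k + 1), by rw [hk]; ring⟩
  omega

theorem floordiv_exact (x d q : Int) (hd : 0 < d) (h : x = d * q) :
    PySem.Int.floordiv x d = q := by
  rw [PySem.Int.floordiv_eq_ediv_of_pos hd, h, Int.mul_ediv_cancel_left _ (by omega)]

-- ===== VERDICT (by name: the statement is the Claim_ definition above) =====
theorem magicalWell_spec : Claim_equal_magicalWell := by
  unfold Claim_equal_magicalWell
  intro a b n _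
  unfold Spec_magicalWell magicalWell magicalWell_alt
  show magicalWellLoop a b 0 0 n = max n 0 * a * b
      + (a + b) * PySem.Int.floordiv (max n 0 * (max n 0 - 1)) 2
      + PySem.Int.floordiv ((max n 0 - 1) * max n 0 * (2 * max n 0 - 1)) 6
  set m : Int := max n 0 with hm
  obtain ⟨q2, hq2⟩ := two_dvd_tri m
  obtain ⟨q6, hq6⟩ := six_dvd_sq m
  rw [floordiv_exact _ _ _ (by norm_num) hq2, floordiv_exact _ _ _ (by norm_num) hq6]
  rw [magicalWellLoop_eq n.toNat a b 0 0 n (by omega)]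
  have hcast : ((n.toNat : Int)) = m := by omega
  have h6 := six_mul_sval n.toNat a b
  rw [hcast] at h6
  have : 6 * (0 + sval a b n.toNat) = 6 * (m * a * b + (a + b) * q2 + q6) := by
    rw [zero_add, h6, hq2, hq6]; ring
  have := mul_left_cancel₀ (a := (6 : Int)) (by norm_num) this
  linarith
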